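-- pv_equiv track=rewrite | github.com/onlyEugeneLi/leetcode-practice | Amazon-OA/Find-Max-Data-Centre-Health.py | findMaxHealthSum
-- ===== SOURCE A (Python) =====
-- def findMaxHealthSum(health: list[int], serverType: list[int], m: int) -> int:
--     hashmap = {}
--     for h, t in zip(health, serverType):
--         if t in hashmap:
--             hashmap[t] += h
--         else:
--             hashmap[t] = h
--
--     sum_health = list(hashmap.values())
--     sum_health.sort(reverse=True) # sort() sorts the list in place
--
--     # Find out the max health value
--     max_health = 0
--     # min(m, len(sum_health)):
--     # in case that allowed number of types higer than available number of types
--     for i in range(min(m, len(sum_health))):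
--         max_health += sum_health[i]
--     return max_health
-- ===== SOURCE B (Python) =====
-- def findMaxHealthSum(health: list[int], serverType: list[int], m: int) -> int:
--     pairs = sorted(zip(serverType, health), key=lambda p: p[0])
--     totals = []
--     if pairs:
--         cur_t, cur_sum = pairs[0]
--         for t, h in pairs[1:]:
--             if t == cur_t:
--                 cur_sum += h
--             else:
--                 totals.append(cur_sum)
--                 cur_t, cur_sum = t, h
--         totals.append(cur_sum)
--     totals.sort()
--     k = len(totals)
--     return sum(totals[k - min(m, k):])
-- ===== Notes on version B (the rewrite author's own statement) =====
-- stated objective: alternative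
-- what changed: B replaces A's dict aggregation, descending sort and indexed prefix loop by sorting the (type, health) pairs once, group-summing adjacent equal types in one scan, and summing a tail slice of the ascending totals.
import Mathlib
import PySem

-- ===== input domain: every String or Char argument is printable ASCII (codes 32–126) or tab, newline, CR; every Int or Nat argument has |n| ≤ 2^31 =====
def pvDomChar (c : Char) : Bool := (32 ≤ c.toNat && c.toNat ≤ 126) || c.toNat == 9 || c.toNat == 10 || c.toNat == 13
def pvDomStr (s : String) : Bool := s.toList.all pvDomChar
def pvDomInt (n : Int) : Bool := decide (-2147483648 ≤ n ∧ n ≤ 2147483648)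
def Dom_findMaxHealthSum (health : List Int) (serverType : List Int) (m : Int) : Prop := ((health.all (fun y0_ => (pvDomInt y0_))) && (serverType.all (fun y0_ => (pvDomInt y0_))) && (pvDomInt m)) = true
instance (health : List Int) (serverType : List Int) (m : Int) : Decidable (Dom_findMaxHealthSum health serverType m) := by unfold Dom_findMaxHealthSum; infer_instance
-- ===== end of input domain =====

-- B sums the same per-type totals via a different route (dedup + filtered sums, ascending sort, tail slice); objective: alternative.

-- ===== PORT A =====
def findMaxHealthSum (health : List Int) (serverType : List Int) (m : Int) : Int :=
  let hashmap : PySem.Dict Int Int :=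
    (health.zip serverType).foldl
      (fun d p =>
        if d.contains p.2 then d.insert p.2 (d.getD p.2 0 + p.1)
        else d.insert p.2 p.1)
      PySem.Dict.empty
  let sum_health := hashmap.values
  let sum_health := PySem.List.sorted sum_health (fun x => x) true
  (PySem.List.pyRange 0 (min m (sum_health.length : Int)) 1).foldl
    (fun max_health i => max_health + PySem.List.pyGetD sum_health i 0) 0

-- ===== PORT B =====
-- B's grouping loop: running (current type, running sum), emitting a total on each type change.
def pvGo (l : List (Int × Int)) (curT : Int) (curSum : Int) : List Int :=
  match l with
  | [] => [curSum]
  | (t, h) :: rest =>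
    if t == curT then pvGo rest curT (curSum + h)
    else curSum :: pvGo rest t h

def findMaxHealthSum_alt (health : List Int) (serverType : List Int) (m : Int) : Int :=
  let pairs := PySem.List.sorted (serverType.zip health) (fun p => p.1) false
  let totals :=
    match pairs with
    | [] => []
    | (t, h) :: rest => pvGo rest t h
  let totals := PySem.List.sorted totals (fun x => x) false
  let k : Int := (totals.length : Int)
  (PySem.List.slice totals (some (k - min m k)) none).sum

-- ===== PRECONDITION & SPEC =====
def Spec_findMaxHealthSum (health : List Int) (serverType : List Int) (m : Int) (out : Int) : Prop := out = findMaxHealthSum_alt health serverType m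
instance (health : List Int) (serverType : List Int) (m : Int) (out : Int) : Decidable (Spec_findMaxHealthSum health serverType m out) := by unfold Spec_findMaxHealthSum; infer_instance

-- ===== CLAIM (what is proved, stated in full; the proofs are below) =====
def Claim_equal_findMaxHealthSum : Prop := ∀ (health : List Int) (serverType : List Int) (m : Int), Dom_findMaxHealthSum health serverType m → Spec_findMaxHealthSum health serverType m (findMaxHealthSum health serverType m)

-- ===== LEMMAS AND PROOFS =====

-- A's branching insert loop is one uniform insert-accumulate loop.
lemma foldA_eq_foldg (l : List (Int × Int)) (d : PySem.Dict Int Int) :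
    l.foldl (fun d p => if d.contains p.2 then d.insert p.2 (d.getD p.2 0 + p.1)
                        else d.insert p.2 p.1) d
      = l.foldl (fun d p => d.insert p.2 (d.getD p.2 0 + p.1)) d := by
  induction l generalizing d with
  | nil => rfl
  | cons p l ih =>
    simp only [List.foldl]
    by_cases h : d.contains p.2 = true
    · rw [if_pos h, ih]
    · have h0 : d.getD p.2 0 = 0 := PySem.Dict.getD_of_not_contains d 0 (by simpa using h)
      rw [if_neg h, h0, zero_add, ih]

lemma getD_foldg (l : List (Int × Int)) (d : PySem.Dict Int Int) (t : Int) :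
    (l.foldl (fun d p => d.insert p.2 (d.getD p.2 0 + p.1)) d).getD t 0
      = d.getD t 0 + ((l.filter (fun p => p.2 == t)).map (·.1)).sum := by
  induction l generalizing d with
  | nil => simp
  | cons p l ih =>
    simp only [List.foldl, List.filter]
    rw [ih]
    by_cases h : p.2 = t
    · have h2 : (p.2 == t) = true := by simp [h]
      simp [h]
      ring
    · have h2 : (p.2 == t) = false := by simp [h]
      simp [h2, PySem.Dict.getD_insert, Ne.symm h]

-- A's aggregated per-type totals, in first-occurrence order.
lemma values_foldg (l : List (Int × Int)) :
    (l.foldl (fun d p => d.insert p.2 (d.getD p.2 0 + p.1)) (PySem.Dict.empty : PySem.Dict Int Int)).values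
      = (PySem.List.dedup (l.map (·.2))).map
          (fun t => ((l.filter (fun p => p.2 == t)).map (·.1)).sum) := by
  set d := l.foldl (fun d p => d.insert p.2 (d.getD p.2 0 + p.1)) (PySem.Dict.empty : PySem.Dict Int Int) with hd
  have hnd : d.keys.Nodup := by
    rw [hd]
    exact PySem.Dict.nodup_keys_foldl_insert_key l (·.2) _ _ (by simp [PySem.Dict.keys_empty])
  have hkeys : d.keys = PySem.List.dedup (l.map (·.2)) := by
    rw [hd, PySem.Dict.keys_foldl_insert_key, PySem.Dict.keys_empty, PySem.Set.update_nil_left]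
    simp
  rw [PySem.Dict.values_eq_map_keys d hnd 0, hkeys]
  refine List.map_congr_left (fun t _ => ?_)
  rw [hd, getD_foldg, PySem.Dict.getD_empty, zero_add]

-- Python's reverse sort of an Int list is the reverse of its ascending sort.
lemma sorted_rev_eq_reverse (xs : List Int) :
    PySem.List.sorted xs (fun x => x) true = (PySem.List.sorted xs (fun x => x) false).reverse := by
  refine ((PySem.List.sorted_perm xs (fun x => x) true).trans
        ((PySem.List.sorted_perm xs (fun x => x) false).symm.trans
          (List.reverse_perm (PySem.List.sorted xs (fun x => x) false)).symm)).eq_of_pairwise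
      (le := fun a b => b ≤ a) (fun a b _ _ x y => le_antisymm y x) ?_ ?_
  · exact PySem.List.sorted_pairwise_rev xs (fun x => x)
  · rw [List.pairwise_reverse]
    exact PySem.List.sorted_pairwise xs (fun x => x)

-- A's indexed prefix loop is the sum of a prefix.
lemma foldl_prefix_sum (xs : List Int) (n : Nat) (a : Int) (hn : n ≤ xs.length) :
    (PySem.List.pyRange 0 (n : Int) 1).foldl (fun acc i => acc + PySem.List.pyGetD xs i 0) a
      = a + (xs.take n).sum := by
  induction n generalizing a with
  | zero => simp [PySem.List.pyRange_one_eq_nil]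
  | succ k ih =>
    have hk : k < xs.length := by omega
    have hsplit : ((k + 1 : Nat) : Int) = (k : Int) + 1 := by push_cast; ring
    rw [hsplit, PySem.List.pyRange_one_succ_right (by positivity), List.foldl_append,
        ih a (by omega)]
    have hget : PySem.List.pyGetD xs (k : Int) 0 = xs[k] := by
      rw [PySem.List.pyGetD_natCast]
      exact List.getD_eq_getElem xs 0 hk
    rw [List.take_add_one, List.getElem?_eq_getElem hk]
    simp only [List.foldl_cons, List.foldl_nil, hget, Option.toList_some, List.sum_append,
      List.sum_cons, List.sum_nil]
    ring

-- A's bounded index loop over a list is the sum of its first min(m, len) elements.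
lemma foldA_take (L : List Int) (m : Int) :
    (PySem.List.pyRange 0 (min m (L.length : Int)) 1).foldl
        (fun acc i => acc + PySem.List.pyGetD L i 0) 0
      = (L.take (min m (L.length : Int)).toNat).sum := by
  rcases le_or_gt (min m (L.length : Int)) 0 with h0 | h0
  · rw [PySem.List.pyRange_one_eq_nil h0]
    have h1 : (min m (L.length : Int)).toNat = 0 := by omega
    simp [h1]
  · have hn : min m (L.length : Int) = (((min m (L.length : Int)).toNat : Nat) : Int) := by omega
    conv_lhs => rw [hn]
    rw [foldl_prefix_sum L _ 0 (by omega), zero_add]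

-- Summing a prefix of the reversed list is summing the matching tail slice.
lemma tail_sum (L : List Int) (m : Int) :
    (L.reverse.take (min m (L.length : Int)).toNat).sum
      = (PySem.List.slice L (some ((L.length : Int) - min m (L.length : Int))) none).sum := by
  have hs0 : (0 : Int) ≤ (L.length : Int) - min m (L.length : Int) := by omega
  rw [PySem.List.slice_from L hs0]
  rcases le_or_gt (min m (L.length : Int)) 0 with h0 | h0
  · have h1 : (min m (L.length : Int)).toNat = 0 := by omega
    rw [h1, List.drop_eq_nil_of_le (by omega : L.length ≤ ((L.length : Int) - min m (L.length : Int)).toNat)]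
    simp
  · have h1 : ((L.length : Int) - min m (L.length : Int)).toNat
        = L.length - (min m (L.length : Int)).toNat := by omega
    rw [h1, List.take_reverse, List.sum_reverse_int]

-- Per-type sums in first-occurrence order of the key (pairs are (type, value)).
def pvTypeSums (l : List (Int × Int)) : List Int :=
  (PySem.List.dedup (l.map (·.1))).map
    (fun u => ((l.filter (fun p => p.1 == u)).map (·.2)).sum)

lemma discard_eq_filter (s : List Int) (x : Int) :
    PySem.Set.discard s x = s.filter (fun y => !(y == x)) := rfl

lemma ofList_filter (xs : List Int) (p : Int → Bool) :
    PySem.Set.ofList (xs.filter p) = (PySem.Set.ofList xs).filter p := by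
  induction xs with
  | nil => rfl
  | cons x xs ih =>
    by_cases hx : p x = true
    · rw [List.filter_cons_of_pos hx, PySem.Set.ofList_cons, PySem.Set.ofList_cons,
          discard_eq_filter, discard_eq_filter, List.filter_cons_of_pos hx, ih,
          List.filter_filter, List.filter_filter]
      congr 1
      apply List.filter_congr
      intro a _
      simp [Bool.and_comm]
    · rw [List.filter_cons_of_neg (by simpa using hx), ih, PySem.Set.ofList_cons,
          discard_eq_filter, List.filter_cons_of_neg (by simpa using hx), List.filter_filter]
      symm
      apply List.filter_congr
      intro a _
      by_cases ha : a = x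
      · simp [ha, hx]
      · simp [ha]

lemma typeSums_cons (t h : Int) (rest : List (Int × Int)) :
    pvTypeSums ((t, h) :: rest)
      = (h + ((rest.filter (fun p => p.1 == t)).map (·.2)).sum)
        :: pvTypeSums (rest.filter (fun p => !(p.1 == t))) := by
  unfold pvTypeSums
  simp only [List.map_cons, PySem.List.dedup_eq_ofList, PySem.Set.ofList_cons, List.map_cons]
  congr 1
  case _ =>
    rw [List.filter_cons_of_pos (by simp)]
    simp
  case _ =>
    have hkeys : PySem.Set.discard (PySem.Set.ofList (rest.map (·.1))) t
        = PySem.Set.ofList ((rest.filter (fun p => !(p.1 == t))).map (·.1)) := by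
      rw [discard_eq_filter, ← ofList_filter]
      congr 1
      rw [List.filter_map]
      rfl
    rw [hkeys]
    refine List.map_congr_left (fun u hu => ?_)
    have hut : ¬(u = t) := by
      rw [PySem.Set.mem_ofList] at hu
      obtain ⟨p, hp, hpu⟩ := List.mem_map.mp hu
      have hf := List.of_mem_filter hp
      intro he
      simp only [hpu, he] at hf
      simp at hf
    rw [List.filter_cons_of_neg (by simp [Ne.symm hut])]
    congr 1
    rw [List.filter_filter]
    congr 1
    apply List.filter_congr
    intro p _
    by_cases hp : p.1 = u
    · simp [hp, hut]
    · simp [hp]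

lemma go_spec (l : List (Int × Int)) (t acc : Int)
    (hs : (l.map (·.1)).Pairwise (· ≤ ·)) (hlb : ∀ p ∈ l, t ≤ p.1) :
    pvGo l t acc
      = (acc + ((l.filter (fun p => p.1 == t)).map (·.2)).sum)
        :: pvTypeSums (l.filter (fun p => !(p.1 == t))) := by
  induction l generalizing t acc with
  | nil => simp [pvGo, pvTypeSums]
  | cons q rest ih =>
    obtain ⟨t', h⟩ := q
    rw [List.map_cons, List.pairwise_cons] at hs
    by_cases he : t' = t
    · subst he
      rw [show pvGo ((t', h) :: rest) t' acc = pvGo rest t' (acc + h) by simp [pvGo]]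
      rw [ih t' (acc + h) hs.2 (fun p hp => hs.1 p.1 (List.mem_map_of_mem hp))]
      rw [List.filter_cons_of_pos (by simp), List.filter_cons_of_neg (by simp)]
      simp [add_assoc]
    · have hne : (t' == t) = false := by simp [he]
      have hlt : t < t' :=
        lt_of_le_of_ne (hlb _ (List.mem_cons_self)) (Ne.symm he)
      have hnone : ∀ p ∈ (t', h) :: rest, (p.1 == t) = false := by
        intro p hp
        rcases List.mem_cons.mp hp with h1 | h1
        · simp [h1, he]
        · have : t' ≤ p.1 := hs.1 p.1 (List.mem_map_of_mem h1)
          simp; omega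
      rw [show pvGo ((t', h) :: rest) t acc = acc :: pvGo rest t' h by simp [pvGo, hne]]
      rw [ih t' h hs.2 (fun p hp => hs.1 p.1 (List.mem_map_of_mem hp))]
      rw [show List.filter (fun p => p.1 == t) ((t', h) :: rest) = [] from
            List.filter_eq_nil_iff.mpr (fun p hp => by simp [hnone p hp]),
          show List.filter (fun p => !(p.1 == t)) ((t', h) :: rest) = (t', h) :: rest from
            List.filter_eq_self.mpr (fun p hp => by simp [hnone p hp])]
      rw [typeSums_cons]
      simp

lemma typeSums_perm (l l' : List (Int × Int)) (hp : l.Perm l') :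
    (pvTypeSums l).Perm (pvTypeSums l') := by
  unfold pvTypeSums
  have hf : (fun u => ((l.filter (fun p => p.1 == u)).map (·.2)).sum)
      = (fun u => ((l'.filter (fun p => p.1 == u)).map (·.2)).sum) := by
    funext u
    exact ((hp.filter _).map _).sum_eq
  rw [hf]
  refine List.Perm.map _ ?_
  refine (List.perm_ext_iff_of_nodup (PySem.List.nodup_dedup _) (PySem.List.nodup_dedup _)).mpr ?_
  intro x
  rw [PySem.List.mem_dedup, PySem.List.mem_dedup]
  exact (hp.map (·.1)).mem_iff

lemma typeSums_swap (l : List (Int × Int)) :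
    pvTypeSums (l.map Prod.swap)
      = (PySem.List.dedup (l.map (·.2))).map
          (fun t => ((l.filter (fun p => p.2 == t)).map (·.1)).sum) := by
  unfold pvTypeSums
  rw [List.map_map]
  refine List.map_congr_left (fun u _ => ?_)
  rw [List.filter_map, List.map_map]
  rfl

theorem findMaxHealthSum_spec : Claim_equal_findMaxHealthSum := by
  unfold Claim_equal_findMaxHealthSum
  intro health serverType m _
  unfold Spec_findMaxHealthSum findMaxHealthSum findMaxHealthSum_alt
  simp only []
  rw [foldA_eq_foldg, values_foldg, sorted_rev_eq_reverse, foldA_take, List.length_reverse,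
      tail_sum]
  have key : PySem.List.sorted
        (match PySem.List.sorted (serverType.zip health) (fun p => p.1) false with
          | [] => []
          | (t, h) :: rest => pvGo rest t h) (fun x => x) false
      = PySem.List.sorted
          ((PySem.List.dedup ((health.zip serverType).map (·.2))).map
            (fun t => (((health.zip serverType).filter (fun p => p.2 == t)).map (·.1)).sum))
          (fun x => x) false := by
    refine (PySem.List.sorted_id_eq_sorted_id_iff_perm _ _).mpr ?_
    have hB : (match PySem.List.sorted (serverType.zip health) (fun p => p.1) false with
          | [] => []
          | (t, h) :: rest => pvGo rest t h)
        = pvTypeSums (PySem.List.sorted (serverType.zip health) (fun p => p.1) false) := by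
      have hs := PySem.List.sorted_map_key_pairwise (serverType.zip health) (fun p => p.1)
      cases hsp : PySem.List.sorted (serverType.zip health) (fun p => p.1) false with
      | nil => rfl
      | cons q rest =>
        obtain ⟨t, h⟩ := q
        rw [hsp] at hs
        rw [List.map_cons, List.pairwise_cons] at hs
        show pvGo rest t h = pvTypeSums ((t, h) :: rest)
        rw [go_spec rest t h hs.2 (fun p hp => hs.1 p.1 (List.mem_map_of_mem hp)),
            typeSums_cons]
    rw [hB]
    refine (typeSums_perm _ _
      (PySem.List.sorted_perm (serverType.zip health) (fun p => p.1) false)).trans ?_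
    rw [← List.zip_swap health serverType, typeSums_swap]
  rw [key]

-- ===== VERDICT (by name: the statement is the Claim_ definition above) =====
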